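-- pv_equiv track=rewrite | github.com/egandone/adventofcode2021 | day20/day20p1.py | expand_grid
-- ===== SOURCE A (Python) =====
-- def expand_grid(grid, boundary_char):
--     lines = []
--     for r in range(-2, len(grid) + 2):
--         line = []
--         if r < 0 or r >= len(grid):
--             line = [boundary_char] * (len(grid[0]) + 4)
--         else:
--             for c in range(-2, len(grid[r]) + 2):
--                 if c < 0 or c >= len(grid[r]):
--                     line.append(boundary_char)
--                 else:
--                     line.append(grid[r][c])
--         lines.append(line)
--     return lines
-- ===== SOURCE B (Python) =====
-- def expand_grid(grid, boundary_char):
--     width = len(grid[0]) + 4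
--     rows = [[boundary_char] * width, [boundary_char] * width]
--     for row in grid:
--         rows.append([boundary_char, boundary_char] + list(row) + [boundary_char, boundary_char])
--     rows.append([boundary_char] * width)
--     rows.append([boundary_char] * width)
--     return rows
-- ===== Notes on version B (the rewrite author's own statement) =====
-- stated objective: simpler
-- what changed: Replaces A's per-cell bounds-checked double loop over extended index ranges by wholesale construction: two replicated boundary rows, each original row wrapped with two boundary cells on each side, and two boundary rows at the bottom.
import Mathlib
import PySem

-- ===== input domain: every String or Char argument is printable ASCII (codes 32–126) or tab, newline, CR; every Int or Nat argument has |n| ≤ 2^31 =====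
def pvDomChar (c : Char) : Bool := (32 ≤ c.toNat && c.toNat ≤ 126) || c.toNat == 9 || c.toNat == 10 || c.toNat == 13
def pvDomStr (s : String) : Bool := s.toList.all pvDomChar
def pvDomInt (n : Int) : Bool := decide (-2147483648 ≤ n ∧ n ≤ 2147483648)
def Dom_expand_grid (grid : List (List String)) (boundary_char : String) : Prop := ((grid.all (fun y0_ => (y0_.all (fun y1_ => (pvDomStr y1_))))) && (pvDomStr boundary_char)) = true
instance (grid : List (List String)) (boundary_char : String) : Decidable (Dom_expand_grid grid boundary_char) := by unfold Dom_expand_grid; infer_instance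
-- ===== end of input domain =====

-- B replaits the padding by wholesale row construction instead of A's per-cell bounds-checked
-- double loop; objective: simpler. Both raise (return none semantics) only on the empty grid.

-- ===== PORT A =====
def expand_grid (grid : List (List String)) (boundary_char : String) : List (List String) :=
  (PySem.List.pyRange (-2) ((grid.length : Int) + 2) 1).foldl (fun lines r =>
    let line :=
      if r < 0 ∨ r ≥ (grid.length : Int) then
        List.replicate ((PySem.List.pyGetD grid 0 []).length + 4) boundary_char
      else
        let row := PySem.List.pyGetD grid r []
        (PySem.List.pyRange (-2) ((row.length : Int) + 2) 1).foldl (fun line c =>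
          if c < 0 ∨ c ≥ (row.length : Int) then line ++ [boundary_char]
          else line ++ [PySem.List.pyGetD row c ""]) []
    lines ++ [line]) []

-- ===== PORT B =====
def expand_grid_alt (grid : List (List String)) (boundary_char : String) : List (List String) :=
  let width := (PySem.List.pyGetD grid 0 []).length + 4
  ([List.replicate width boundary_char, List.replicate width boundary_char] ++
     grid.map (fun row => [boundary_char, boundary_char] ++ row ++ [boundary_char, boundary_char])) ++
  [List.replicate width boundary_char, List.replicate width boundary_char]

-- ===== PRECONDITION & SPEC =====
-- A (and B) evaluate grid[0], an IndexError on the empty grid: Pre_ excludes exactly grid = [].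
def Pre_expand_grid (grid : List (List String)) (boundary_char : String) : Prop := grid ≠ []
instance (grid : List (List String)) (boundary_char : String) : Decidable (Pre_expand_grid grid boundary_char) := by unfold Pre_expand_grid; infer_instance
def pvWitness_expand_grid : List (List String) × String := ([["#", "."], ["."]], ".")

def Spec_expand_grid (grid : List (List String)) (boundary_char : String) (out : List (List String)) : Prop := out = expand_grid_alt grid boundary_char
instance (grid : List (List String)) (boundary_char : String) (out : List (List String)) : Decidable (Spec_expand_grid grid boundary_char out) := by unfold Spec_expand_grid; infer_instance

-- ===== CLAIM (what is proved, stated in full; the proofs are below) =====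
def Claim_equal_expand_grid : Prop := ∀ (grid : List (List String)) (boundary_char : String), Dom_expand_grid grid boundary_char → Pre_expand_grid grid boundary_char → Spec_expand_grid grid boundary_char (expand_grid grid boundary_char)

-- ===== LEMMAS AND PROOFS =====

-- A's inner loop over c ∈ range(-2, len(row)+2) builds exactly [b, b] ++ row ++ [b, b].
theorem inner_loop_eq (row : List String) (b : String) :
    (PySem.List.pyRange (-2) ((row.length : Int) + 2) 1).foldl (fun line c =>
        if c < 0 ∨ c ≥ (row.length : Int) then line ++ [b]
        else line ++ [PySem.List.pyGetD row c ""]) [] =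
      [b, b] ++ row ++ [b, b] := by
  have hf : (fun (line : List String) (c : Int) =>
        if c < 0 ∨ c ≥ (row.length : Int) then line ++ [b]
        else line ++ [PySem.List.pyGetD row c ""]) =
      (fun line c => line ++ [if c < 0 ∨ c ≥ (row.length : Int) then b
        else PySem.List.pyGetD row c ""]) := by
    funext line c; split_ifs <;> rfl
  rw [hf, PySem.List.foldl_append_singleton_eq_map]
  have hsplit : PySem.List.pyRange (-2) ((row.length : Int) + 2) 1 =
      (PySem.List.pyRange (-2) 0 1 ++ PySem.List.pyRange 0 (row.length : Int) 1) ++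
        PySem.List.pyRange (row.length : Int) ((row.length : Int) + 2) 1 := by
    rw [PySem.List.pyRange_one_append (-2) 0 ((row.length : Int) + 2) (by omega) (by omega),
        PySem.List.pyRange_one_append 0 (row.length : Int) ((row.length : Int) + 2)
          (by omega) (by omega), List.append_assoc]
  rw [hsplit]
  have h1 : PySem.List.pyRange (-2) 0 1 = [-2, -1] := by decide
  have h2 : PySem.List.pyRange (row.length : Int) ((row.length : Int) + 2) 1 =
      [(row.length : Int), (row.length : Int) + 1] := by
    rw [PySem.List.pyRange_one_cons (by omega), PySem.List.pyRange_one_cons (by omega),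
        PySem.List.pyRange_one_eq_nil (by omega)]
  have hstep : ∀ c ∈ PySem.List.pyRange 0 (row.length : Int) 1,
      (if c < 0 ∨ c ≥ (row.length : Int) then b else PySem.List.pyGetD row c "") =
        PySem.List.pyGetD row c "" := by
    intro c hc
    have := (PySem.List.mem_pyRange_one).1 hc
    rw [if_neg (by omega)]
  have hmid : (PySem.List.pyRange 0 (row.length : Int) 1).map
      (fun c => if c < 0 ∨ c ≥ (row.length : Int) then b else PySem.List.pyGetD row c "") =
      row := by
    rw [List.map_congr_left hstep, PySem.List.map_pyGetD_pyRange_zero']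
  simp only [List.map_append, hmid, h1, h2, List.map_cons, List.map_nil]
  have hb0 : ∀ c : Int, c < 0 ∨ c ≥ (row.length : Int) →
      (if c < 0 ∨ c ≥ (row.length : Int) then b else PySem.List.pyGetD row c "") = b := by
    intro c hc; rw [if_pos hc]
  rw [hb0 (-2) (by omega), hb0 (-1) (by omega), hb0 (row.length : Int) (by omega),
      hb0 ((row.length : Int) + 1) (by omega)]
  simp

-- ===== VERDICT (by name: the statement is the Claim_ definition above) =====
theorem expand_grid_spec : Claim_equal_expand_grid := by
  intro grid b _ _
  show expand_grid grid b = expand_grid_alt grid b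
  unfold expand_grid expand_grid_alt
  simp only
  rw [PySem.List.foldl_append_singleton_eq_map]
  set border := List.replicate ((PySem.List.pyGetD grid 0 []).length + 4) b with hborder
  have hsplit : PySem.List.pyRange (-2) ((grid.length : Int) + 2) 1 =
      (PySem.List.pyRange (-2) 0 1 ++ PySem.List.pyRange 0 (grid.length : Int) 1) ++
        PySem.List.pyRange (grid.length : Int) ((grid.length : Int) + 2) 1 := by
    rw [PySem.List.pyRange_one_append (-2) 0 ((grid.length : Int) + 2) (by omega) (by omega),
        PySem.List.pyRange_one_append 0 (grid.length : Int) ((grid.length : Int) + 2)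
          (by omega) (by omega), List.append_assoc]
  rw [hsplit]
  have h1 : PySem.List.pyRange (-2) 0 1 = [-2, -1] := by decide
  have h2 : PySem.List.pyRange (grid.length : Int) ((grid.length : Int) + 2) 1 =
      [(grid.length : Int), (grid.length : Int) + 1] := by
    rw [PySem.List.pyRange_one_cons (by omega), PySem.List.pyRange_one_cons (by omega),
        PySem.List.pyRange_one_eq_nil (by omega)]
  have hstep : ∀ r ∈ PySem.List.pyRange 0 (grid.length : Int) 1,
      (if r < 0 ∨ r ≥ (grid.length : Int) then border
      else (PySem.List.pyRange (-2) (((PySem.List.pyGetD grid r []).length : Int) + 2) 1).foldl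
        (fun line c => if c < 0 ∨ c ≥ ((PySem.List.pyGetD grid r []).length : Int)
          then line ++ [b] else line ++ [PySem.List.pyGetD (PySem.List.pyGetD grid r []) c ""]) []) =
      [b, b] ++ PySem.List.pyGetD grid r [] ++ [b, b] := by
    intro r hr
    have := (PySem.List.mem_pyRange_one).1 hr
    rw [if_neg (by omega), inner_loop_eq]
  have hmid : (PySem.List.pyRange 0 (grid.length : Int) 1).map (fun r =>
      if r < 0 ∨ r ≥ (grid.length : Int) then border
      else (PySem.List.pyRange (-2) (((PySem.List.pyGetD grid r []).length : Int) + 2) 1).foldl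
        (fun line c => if c < 0 ∨ c ≥ ((PySem.List.pyGetD grid r []).length : Int)
          then line ++ [b] else line ++ [PySem.List.pyGetD (PySem.List.pyGetD grid r []) c ""]) []) =
      grid.map (fun row => [b, b] ++ row ++ [b, b]) := by
    rw [List.map_congr_left hstep,
        show (fun r => [b, b] ++ PySem.List.pyGetD grid r [] ++ [b, b]) =
          ((fun row => [b, b] ++ row ++ [b, b]) ∘ fun j => PySem.List.pyGetD grid j []) from rfl,
        ← List.map_map, PySem.List.map_pyGetD_pyRange_zero' grid ([] : List String)]
  have hbr : ∀ r : Int, r < 0 ∨ r ≥ (grid.length : Int) →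
      (if r < 0 ∨ r ≥ (grid.length : Int) then border
      else (PySem.List.pyRange (-2) (((PySem.List.pyGetD grid r []).length : Int) + 2) 1).foldl
        (fun line c => if c < 0 ∨ c ≥ ((PySem.List.pyGetD grid r []).length : Int)
          then line ++ [b] else line ++ [PySem.List.pyGetD (PySem.List.pyGetD grid r []) c ""]) []) =
        border := by
    intro r hrc; rw [if_pos hrc]
  simp only [List.map_append, hmid, h1, h2, List.map_cons, List.map_nil]
  rw [hbr (-2) (by omega), hbr (-1) (by omega), hbr (grid.length : Int) (by omega),
      hbr ((grid.length : Int) + 1) (by omega)]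
  simp
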